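-- pv_equiv track=rewrite | github.com/kurogedelic/i-was-in-the-box | tracks/stress-strain_curve/stress-strain_curve.py | detect_regions
-- ===== SOURCE A (Python) =====
-- def detect_regions(stresses):
--     """Detect material regions based on stress levels"""
--     regions = []
--     for stress in stresses:
--         if stress < 200:
--             regions.append(0)  # Elastic
--         elif stress < 250:
--             regions.append(1)  # Yield
--         elif stress < 380:
--             regions.append(2)  # Plastic
--         elif stress < 400:
--             regions.append(3)  # Necking
--         else:
--             regions.append(4)  # Fracture
--     return regions
-- ===== SOURCE B (Python) =====
-- import bisect
--
-- _THRESHOLDS = [200, 250, 380, 400]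
--
-- def detect_regions(stresses):
--     """Detect material regions based on stress levels"""
--     return [bisect.bisect_right(_THRESHOLDS, stress) for stress in stresses]
-- ===== Notes on version B (the rewrite author's own statement) =====
-- stated objective: idiomatic
-- what changed: Replaces the five-way if/elif comparison ladder with bisect.bisect_right over a precomputed sorted threshold table, collected by a list comprehension.
import Mathlib
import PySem

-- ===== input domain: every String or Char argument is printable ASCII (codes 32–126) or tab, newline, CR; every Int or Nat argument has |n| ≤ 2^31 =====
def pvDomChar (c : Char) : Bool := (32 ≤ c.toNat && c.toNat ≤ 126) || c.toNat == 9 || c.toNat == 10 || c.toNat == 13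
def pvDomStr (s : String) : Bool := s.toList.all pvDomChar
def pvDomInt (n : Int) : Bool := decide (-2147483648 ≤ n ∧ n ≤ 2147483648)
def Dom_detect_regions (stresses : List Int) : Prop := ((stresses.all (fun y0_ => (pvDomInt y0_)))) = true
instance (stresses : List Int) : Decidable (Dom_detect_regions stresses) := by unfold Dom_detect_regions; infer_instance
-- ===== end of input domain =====

-- B replaces A's if/elif comparison ladder by bisect.bisect_right on a sorted threshold table (idiomatic).

-- ===== PORT A =====
-- literal port of A: accumulate `regions` with an if/elif ladder per stress
def detect_regions (stresses : List Int) : List Int :=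
  stresses.foldl (fun regions stress =>
    if stress < 200 then regions ++ [0]
    else if stress < 250 then regions ++ [1]
    else if stress < 380 then regions ++ [2]
    else if stress < 400 then regions ++ [3]
    else regions ++ [4]) []

-- ===== PORT B =====
-- literal port of bisect.bisect_right(a, x): lo=0, hi=len(a); while lo<hi: mid=(lo+hi)//2; if x<a[mid] then hi=mid else lo=mid+1
def bisectRightGo (a : List Int) (x : Int) (lo hi : Nat) : Nat :=
  if _h : lo < hi then
    let mid := (lo + hi) / 2
    if x < a.getD mid 0 then bisectRightGo a x lo mid
    else bisectRightGo a x (mid + 1) hi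
  else lo
termination_by hi - lo
decreasing_by all_goals omega

def pvThresholds : List Int := [200, 250, 380, 400]

def detect_regions_alt (stresses : List Int) : List Int :=
  stresses.map (fun stress => (bisectRightGo pvThresholds stress 0 pvThresholds.length : Int))

-- ===== PRECONDITION & SPEC =====
def Spec_detect_regions (stresses : List Int) (out : List Int) : Prop := out = detect_regions_alt stresses
instance (stresses : List Int) (out : List Int) : Decidable (Spec_detect_regions stresses out) := by unfold Spec_detect_regions; infer_instance

-- ===== CLAIM (what is proved, stated in full; the proofs are below) =====
def Claim_equal_detect_regions : Prop := ∀ (stresses : List Int), Dom_detect_regions stresses → Spec_detect_regions stresses (detect_regions stresses)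

-- ===== LEMMAS AND PROOFS =====

-- the per-element classifier of A
def regionOf (stress : Int) : Int :=
  if stress < 200 then 0
  else if stress < 250 then 1
  else if stress < 380 then 2
  else if stress < 400 then 3
  else 4

theorem bisectRightGo_base (a : List Int) (x : Int) (lo : Nat) :
    bisectRightGo a x lo lo = lo := by
  rw [bisectRightGo]; simp

theorem bisectRightGo_step (a : List Int) (x : Int) (lo hi : Nat) (h : lo < hi) :
    bisectRightGo a x lo hi =
      if x < a.getD ((lo + hi) / 2) 0 then bisectRightGo a x lo ((lo + hi) / 2)
      else bisectRightGo a x ((lo + hi) / 2 + 1) hi := by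
  rw [bisectRightGo]; simp [h]

theorem bisect_eq_regionOf (s : Int) :
    (bisectRightGo pvThresholds s 0 pvThresholds.length : Int) = regionOf s := by
  show (bisectRightGo pvThresholds s 0 4 : Int) = regionOf s
  rw [bisectRightGo_step _ _ _ _ (by omega)]
  norm_num [pvThresholds]
  by_cases h3 : s < 380
  · rw [if_pos h3, bisectRightGo_step _ _ _ _ (by omega)]
    norm_num [pvThresholds]
    by_cases h2 : s < 250
    · rw [if_pos h2, bisectRightGo_step _ _ _ _ (by omega)]
      norm_num [pvThresholds]
      by_cases h1 : s < 200
      · rw [if_pos h1, bisectRightGo_base]; simp [regionOf, h1]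
      · rw [if_neg h1, bisectRightGo_base]; simp [regionOf, h1, h2]
    · rw [if_neg h2, bisectRightGo_base]; simp [regionOf, h2]; omega
  · rw [if_neg h3, bisectRightGo_step _ _ _ _ (by omega)]
    norm_num [pvThresholds]
    by_cases h4 : s < 400
    · rw [if_pos h4, bisectRightGo_base]; simp [regionOf, h3, h4]; omega
    · rw [if_neg h4, bisectRightGo_base]; simp [regionOf, h3, h4]; omega

theorem foldl_append_region (stresses : List Int) (acc : List Int) :
    stresses.foldl (fun regions stress =>
      if stress < 200 then regions ++ [0]
      else if stress < 250 then regions ++ [1]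
      else if stress < 380 then regions ++ [2]
      else if stress < 400 then regions ++ [3]
      else regions ++ [4]) acc = acc ++ stresses.map regionOf := by
  induction stresses generalizing acc with
  | nil => simp
  | cons x xs ih =>
    simp only [List.foldl, List.map]
    rw [ih]
    unfold regionOf
    split_ifs <;> simp

-- ===== VERDICT (by name: the statement is the Claim_ definition above) =====
theorem detect_regions_spec : Claim_equal_detect_regions := by
  intro stresses _
  unfold Spec_detect_regions detect_regions detect_regions_alt
  rw [foldl_append_region]
  simp [bisect_eq_regionOf]
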